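-- pv_equiv track=rewrite | github.com/chloezhao1/cs329-financial-analyzer | financial_signal_engine_v3.py | _any_in_scope
-- ===== SOURCE A (Python) =====
-- def _any_in_scope(
--     neg_positions: list[int],
--     signal_positions: list[int],
--     window: int,
-- ) -> bool:
--     """
--     Check if any signal word falls within `window` tokens of any negation word.
--     Here is the core scope detection function. It implements a sliding
--     window check: for each (negation, signal) pair, compute the token
--     distance and return True if any pair is within the scope window.
--     Args:
--         neg_positions:token indices of negation words
--         signal_positions:token indices of signal words
--         window:maximum distance for negation to apply
--     Returns:
--         True if at least one signal word is in scope of a negation word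
--     """
--     for neg_pos in neg_positions:
--         for sig_pos in signal_positions:
--             if abs(neg_pos - sig_pos) <= window:
--                 return True
--     return False
-- ===== SOURCE B (Python) =====
-- def _any_in_scope(
--     neg_positions: list[int],
--     signal_positions: list[int],
--     window: int,
-- ) -> bool:
--     """Sort the signal positions once; for each negation, binary-search for the
--     first signal >= neg - window and check it is <= neg + window."""
--     sig = sorted(signal_positions)
--     m = len(sig)
--     for n in neg_positions:
--         target = n - window
--         lo, hi = 0, m
--         while lo < hi:
--             mid = (lo + hi) // 2
--             if sig[mid] < target:
--                 lo = mid + 1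
--             else:
--                 hi = mid
--         if lo < m and sig[lo] <= n + window:
--             return True
--     return False
-- ===== Notes on version B (the rewrite author's own statement) =====
-- stated objective: alternative
-- what changed: Replaces the all-pairs nested scan with one sort of the signal positions plus a binary search per negation for the first signal >= neg - window; trades A's early-exit pair scan for O((n+m) log m) worst-case behaviour.
import Mathlib
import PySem

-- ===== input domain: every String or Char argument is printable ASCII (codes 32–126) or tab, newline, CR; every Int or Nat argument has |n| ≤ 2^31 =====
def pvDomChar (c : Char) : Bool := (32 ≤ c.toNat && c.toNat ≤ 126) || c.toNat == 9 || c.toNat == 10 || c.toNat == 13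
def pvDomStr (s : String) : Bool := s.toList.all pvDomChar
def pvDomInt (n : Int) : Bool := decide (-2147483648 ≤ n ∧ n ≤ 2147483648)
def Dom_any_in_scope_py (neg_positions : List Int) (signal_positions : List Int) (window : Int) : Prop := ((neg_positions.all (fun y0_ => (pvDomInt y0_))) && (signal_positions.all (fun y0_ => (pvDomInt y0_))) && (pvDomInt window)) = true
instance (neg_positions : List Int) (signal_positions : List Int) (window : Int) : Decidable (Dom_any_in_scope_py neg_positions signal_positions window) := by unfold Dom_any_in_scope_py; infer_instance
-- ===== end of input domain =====

-- B sorts the signal positions once and binary-searches, per negation, for the first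
-- signal ≥ neg - window, replacing A's all-pairs nested scan (objective: alternative).


-- ===== PORT A =====
-- for neg_pos in negs: for sig_pos in sigs: if abs(neg_pos - sig_pos) <= window: return True; return False
def any_in_scope_py (neg_positions : List Int) (signal_positions : List Int) (window : Int) : Bool :=
  neg_positions.any (fun neg_pos =>
    signal_positions.any (fun sig_pos => decide (|neg_pos - sig_pos| ≤ window)))

-- ===== PORT B =====
-- the hand-written while-loop binary search of Source B: first index i in [lo, hi) with
-- sig[i] >= x, run on a fuel of len steps (the loop takes at most that many)
def lbLoop (sig : List Int) (x : Int) : Nat → Nat → Nat → Nat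
  | 0, lo, _ => lo
  | fuel + 1, lo, hi =>
    if lo < hi then
      if sig.getD ((lo + hi) / 2) 0 < x then lbLoop sig x fuel ((lo + hi) / 2 + 1) hi
      else lbLoop sig x fuel lo ((lo + hi) / 2)
    else lo

def lbAux (sig : List Int) (x : Int) (lo hi : Nat) : Nat :=
  lbLoop sig x sig.length lo hi

def any_in_scope_py_alt (neg_positions : List Int) (signal_positions : List Int) (window : Int) : Bool :=
  let sig := PySem.List.sorted signal_positions id
  neg_positions.any (fun n =>
    let lo := lbAux sig (n - window) 0 sig.length
    decide (lo < sig.length) && decide (sig.getD lo 0 ≤ n + window))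

-- ===== PRECONDITION & SPEC =====
def Spec_any_in_scope_py (neg_positions : List Int) (signal_positions : List Int) (window : Int) (out : Bool) : Prop := out = any_in_scope_py_alt neg_positions signal_positions window
instance (neg_positions : List Int) (signal_positions : List Int) (window : Int) (out : Bool) : Decidable (Spec_any_in_scope_py neg_positions signal_positions window out) := by unfold Spec_any_in_scope_py; infer_instance

-- ===== CLAIM (what is proved, stated in full; the proofs are below) =====
def Claim_equal_any_in_scope_py : Prop := ∀ (neg_positions : List Int) (signal_positions : List Int) (window : Int), Dom_any_in_scope_py neg_positions signal_positions window → Spec_any_in_scope_py neg_positions signal_positions window (any_in_scope_py neg_positions signal_positions window)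

-- ===== LEMMAS AND PROOFS =====

-- monotonicity of a sorted list, index form
lemma sorted_mono (sig : List Int) (hs : List.Pairwise (· ≤ ·) sig)
    (i j : Nat) (hi : i < sig.length) (hj : j < sig.length) (hij : i ≤ j) :
    sig[i] ≤ sig[j] := by
  rcases Nat.lt_or_ge i j with h | h
  · exact List.pairwise_iff_getElem.mp hs i j hi hj h
  · have : i = j := by omega
    subst this; exact le_refl _

-- loop invariant of the binary search: everything left of the result is < x,
-- everything from the result on is ≥ x
lemma lbLoop_spec (sig : List Int) (x : Int) (hs : List.Pairwise (· ≤ ·) sig) :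
    ∀ (fuel lo hi : Nat), hi - lo ≤ fuel → lo ≤ hi → hi ≤ sig.length →
      (∀ j (hj : j < sig.length), j < lo → sig[j] < x) →
      (∀ j (hj : j < sig.length), hi ≤ j → x ≤ sig[j]) →
      lo ≤ lbLoop sig x fuel lo hi ∧ lbLoop sig x fuel lo hi ≤ hi ∧
      (∀ j (hj : j < sig.length), j < lbLoop sig x fuel lo hi → sig[j] < x) ∧
      (∀ j (hj : j < sig.length), lbLoop sig x fuel lo hi ≤ j → x ≤ sig[j]) := by
  intro fuel
  induction fuel with
  | zero =>
    intro lo hi hfuel hle hlen hlow hhigh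
    have heq : lo = hi := by omega
    subst heq
    exact ⟨le_refl _, le_refl _, fun j hj hjlt => hlow j hj hjlt,
      fun j hj hge => hhigh j hj hge⟩
  | succ f ih =>
    intro lo hi hfuel hle hlen hlow hhigh
    show _ ≤ (if lo < hi then _ else lo) ∧ _
    by_cases h : lo < hi
    · simp only [lbLoop, if_pos h]
      have hmidlt : (lo + hi) / 2 < hi := by omega
      have hmidge : lo ≤ (lo + hi) / 2 := by omega
      have hmidlen : (lo + hi) / 2 < sig.length := by omega
      rw [List.getD_eq_getElem sig 0 hmidlen]
      by_cases hcmp : sig[(lo + hi) / 2] < x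
      · rw [if_pos hcmp]
        have hres := ih ((lo + hi) / 2 + 1) hi (by omega) (by omega) hlen
          (fun j hj hjlt => by
            rcases Nat.lt_or_ge j lo with h' | h'
            · exact hlow j hj h'
            · calc sig[j] ≤ sig[(lo + hi) / 2] := sorted_mono sig hs j _ hj hmidlen (by omega)
                _ < x := hcmp)
          hhigh
        exact ⟨by omega, hres.2.1, hres.2.2.1, hres.2.2.2⟩
      · rw [if_neg hcmp]
        rw [not_lt] at hcmp
        have hres := ih lo ((lo + hi) / 2) (by omega) (by omega) (by omega) hlow
          (fun j hj hge => by
            rcases Nat.lt_or_ge j hi with h' | h'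
            · calc x ≤ sig[(lo + hi) / 2] := hcmp
                _ ≤ sig[j] := sorted_mono sig hs _ j hmidlen hj hge
            · exact hhigh j hj h')
        exact ⟨hres.1, by omega, hres.2.2.1, hres.2.2.2⟩
    · simp only [lbLoop, if_neg h]
      have heq : lo = hi := by omega
      subst heq
      exact ⟨le_refl _, le_refl _, fun j hj hjlt => hlow j hj hjlt,
        fun j hj hge => hhigh j hj hge⟩

-- the binary-search check on the sorted list decides ∃ s ∈ sigs, |n - s| ≤ w
lemma check_iff (signal_positions : List Int) (n w : Int) :
    (lbAux (PySem.List.sorted signal_positions id) (n - w) 0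
        (PySem.List.sorted signal_positions id).length <
        (PySem.List.sorted signal_positions id).length ∧
      (PySem.List.sorted signal_positions id).getD
        (lbAux (PySem.List.sorted signal_positions id) (n - w) 0
          (PySem.List.sorted signal_positions id).length) 0 ≤ n + w) ↔
    ∃ s ∈ signal_positions, |n - s| ≤ w := by
  set sig := PySem.List.sorted signal_positions id with hsig
  have hs : List.Pairwise (· ≤ ·) sig := PySem.List.sorted_pairwise signal_positions id
  have hspec := lbLoop_spec sig (n - w) hs sig.length 0 sig.length (by omega) (by omega)
    (le_refl _) (fun j hj hjlt => by omega) (fun j hj hge => by omega)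
  set r := lbAux sig (n - w) 0 sig.length with hr
  rw [lbAux] at hr
  rw [← hr] at hspec
  constructor
  · rintro ⟨hlt, hle⟩
    rw [List.getD_eq_getElem sig 0 hlt] at hle
    refine ⟨sig[r], ?_, ?_⟩
    · exact (PySem.List.mem_sorted signal_positions id false sig[r]).mp
        (List.getElem_mem hlt)
    · have hxle := hspec.2.2.2 r hlt (le_refl _)
      rw [abs_le]; omega
  · rintro ⟨s, hmem, habs⟩
    have hmem' : s ∈ sig := by
      rw [hsig]; exact (PySem.List.mem_sorted signal_positions id false s).mpr hmem
    obtain ⟨j, hj, hjs⟩ := List.mem_iff_getElem.mp hmem'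
    rw [abs_le] at habs
    have hjr : r ≤ j := by
      by_contra hc
      rw [not_le] at hc
      have := hspec.2.2.1 j hj hc
      omega
    have hrlt : r < sig.length := by omega
    refine ⟨hrlt, ?_⟩
    rw [List.getD_eq_getElem sig 0 hrlt]
    calc sig[r] ≤ sig[j] := sorted_mono sig hs r j hrlt hj hjr
      _ = s := hjs
      _ ≤ n + w := by omega

-- ===== VERDICT (by name: the statement is the Claim_ definition above) =====
theorem any_in_scope_py_spec : Claim_equal_any_in_scope_py := by
  intro neg_positions signal_positions window _
  unfold Spec_any_in_scope_py any_in_scope_py any_in_scope_py_alt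
  rw [Bool.eq_iff_iff]
  simp only [List.any_eq_true, Bool.and_eq_true, decide_eq_true_eq]
  constructor
  · rintro ⟨n, hn, s, hsmem, habs⟩
    exact ⟨n, hn, (check_iff signal_positions n window).mpr ⟨s, hsmem, habs⟩⟩
  · rintro ⟨n, hn, hchk⟩
    obtain ⟨s, hsmem, habs⟩ := (check_iff signal_positions n window).mp hchk
    exact ⟨n, hn, s, hsmem, habs⟩
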